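-- pv_equiv track=rewrite | github.com/binun/orange | kamin/AAbasictools.py | convmy
-- ===== SOURCE A (Python) =====
-- def zerosZ(x,y):
--     result=[]
--     #it is diiferent from matlab,
--     #the list begin from 0 not 1 ...!!
--     for i in range(0,x):
--         result.append([])
--         for j in range(0,y):
--             result[i].append(0)
--     return result
--
-- def convmy(V,polyva1):
--         #c=conv(V,polyva1);
--         #c=[polyva1[1]*V,polyva1[2]*V];
--     len1=len(V)
--     len2=len(polyva1)
--     result=zerosZ(len1+1,len2)
--     result2=zerosZ(1,len1+1)
--     for i in range(0,len1):
--         for j in range(0,len2):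
--             result[i][j]=V[i]*polyva1[j]
--
--     for i in range(1,len1+1):
--         result[i][0]=result[i][0]+result[i-1][1]
--
--
--     for i in range(0,len1+1):
--         result2[0][i]=result[i][0]
--
--     c=result2
--     return c
-- ===== SOURCE B (Python) =====
-- def convmy(V, polyva1):
--     # single pass: convolution of V with the first two coefficients of polyva1
--     row = []
--     prev = 0
--     for v in V:
--         row.append(v * polyva1[0] + prev)
--         prev = v * polyva1[1]
--     row.append(prev)
--     return [row]
-- ===== Notes on version B (the rewrite author's own statement) =====
-- stated objective: faster
-- what changed: B computes the output row in one pass over V using only polyva1[0] and polyva1[1], instead of building the full (len(V)+1) x len(polyva1) product matrix and then extracting a column.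
import Mathlib
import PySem

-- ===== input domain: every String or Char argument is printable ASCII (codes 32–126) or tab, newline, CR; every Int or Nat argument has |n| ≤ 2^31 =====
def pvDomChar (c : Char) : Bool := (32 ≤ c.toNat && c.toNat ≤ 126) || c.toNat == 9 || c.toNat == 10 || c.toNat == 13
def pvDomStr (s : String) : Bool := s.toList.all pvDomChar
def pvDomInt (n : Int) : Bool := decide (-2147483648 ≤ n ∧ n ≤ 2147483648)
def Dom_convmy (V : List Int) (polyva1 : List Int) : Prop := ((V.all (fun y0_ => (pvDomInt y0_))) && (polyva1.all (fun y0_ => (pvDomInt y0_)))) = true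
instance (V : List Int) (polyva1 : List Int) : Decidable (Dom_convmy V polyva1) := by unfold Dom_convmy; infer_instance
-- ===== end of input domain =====

-- B replaces A's (len V + 1) × (len polyva1) product matrix by a single pass over V
-- using only polyva1[0] and polyva1[1] (objective: faster, asymptotically).

-- ===== PORT A =====
-- all loop indices come from range(...), hence are nonnegative and in bounds on
-- Pre_-admitted inputs, so Nat indexing with set/getD is exact there
def zerosZ (x y : Nat) : List (List Int) :=
  (List.range x).foldl (fun res i =>
    (List.range y).foldl (fun r _ => r.set i ((r.getD i []) ++ [(0 : Int)])) (res ++ [[]])) []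

-- result[i][j] = x  (in-range assignment)
def set2 (m : List (List Int)) (i j : Nat) (x : Int) : List (List Int) :=
  m.set i ((m.getD i []).set j x)

-- result[i][j]  (in-range read)
def get2 (m : List (List Int)) (i j : Nat) : Int := (m.getD i []).getD j 0

def convmy (V : List Int) (polyva1 : List Int) : List (List Int) :=
  let len1 := V.length
  let len2 := polyva1.length
  let result := zerosZ (len1+1) len2
  let result2 := zerosZ 1 (len1+1)
  let result := (List.range len1).foldl (fun r i =>
      (List.range len2).foldl (fun r j => set2 r i j (V.getD i 0 * polyva1.getD j 0)) r) result
  let result := (List.range' 1 len1).foldl (fun r i =>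
      set2 r i 0 (get2 r i 0 + get2 r (i-1) 1)) result
  let result2 := (List.range (len1+1)).foldl (fun r2 i => set2 r2 0 i (get2 result i 0)) result2
  result2

-- ===== PORT B =====
def convmy_alt (V : List Int) (polyva1 : List Int) : List (List Int) :=
  let st := V.foldl (fun (st : List Int × Int) v =>
      (st.1 ++ [v * polyva1.getD 0 0 + st.2], v * polyva1.getD 1 0)) ([], (0 : Int))
  [st.1 ++ [st.2]]

-- ===== PRECONDITION & SPEC =====
-- exactly the inputs on which Python A returns: it raises IndexError whenever
-- V is nonempty and len(polyva1) < 2, and when both lists are empty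
def Pre_convmy (V : List Int) (polyva1 : List Int) : Prop :=
  (V = [] ∧ polyva1 ≠ []) ∨ 2 ≤ polyva1.length
instance (V : List Int) (polyva1 : List Int) : Decidable (Pre_convmy V polyva1) := by
  unfold Pre_convmy; infer_instance

def pvWitness_convmy : List Int × List Int := ([2, 3, 5], [7, 11, 13])

def Spec_convmy (V : List Int) (polyva1 : List Int) (out : List (List Int)) : Prop :=
  out = convmy_alt V polyva1
instance (V : List Int) (polyva1 : List Int) (out : List (List Int)) : Decidable (Spec_convmy V polyva1 out) := by
  unfold Spec_convmy; infer_instance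

-- ===== CLAIM (what is proved, stated in full; the proofs are below) =====
def Claim_equal_convmy : Prop := ∀ (V : List Int) (polyva1 : List Int), Dom_convmy V polyva1 → Pre_convmy V polyva1 → Spec_convmy V polyva1 (convmy V polyva1)

-- ===== LEMMAS AND PROOFS =====

theorem getD_set {α : Type} (l : List α) (k i : Nat) (w d : α) :
    (l.set k w).getD i d = if k = i ∧ k < l.length then w else l.getD i d := by
  simp only [List.getD, List.getElem?_set]
  split_ifs with h1 h2 h3 h3 <;> simp_all <;> omega

theorem set_getD_self (l : List (List Int)) (i : Nat) : l.set i (l.getD i []) = l := by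
  by_cases h : i < l.length
  · rw [List.getD_eq_getElem l [] h, List.set_getElem_self]
  · exact List.set_eq_of_length_le (by omega)

theorem getD_concat (m : List (List Int)) (z : List Int) :
    (m ++ [z]).getD m.length [] = z := by
  simp [List.getD]

theorem set_concat (m : List (List Int)) (z w : List Int) :
    (m ++ [z]).set m.length w = m ++ [w] := by
  rw [List.set_append_right _ _ (le_refl _)]
  simp

theorem fill_last (y i : Nat) (m : List (List Int)) (row : List Int) (hi : i = m.length) :
    (List.range y).foldl (fun r _ => r.set i ((r.getD i []) ++ [(0 : Int)])) (m ++ [row])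
      = m ++ [row ++ List.replicate y 0] := by
  subst hi
  induction y with
  | zero => simp
  | succ n ih =>
    rw [List.range_succ, List.foldl_append, ih]
    simp only [List.foldl_cons, List.foldl_nil, getD_concat, set_concat]
    rw [List.replicate_succ' (n := n), ← List.append_assoc]

theorem zerosZ_eq (x y : Nat) : zerosZ x y = List.replicate x (List.replicate y 0) := by
  induction x with
  | zero => simp [zerosZ]
  | succ n ih =>
    unfold zerosZ at ih ⊢
    rw [List.range_succ, List.foldl_append, ih]
    simp only [List.foldl_cons, List.foldl_nil]
    rw [fill_last y n _ [] (by simp), List.nil_append, List.replicate_succ' (n := n)]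

-- a fold writing into a single row i, rephrased as one set of that row
theorem setfold_row (f : Nat → Int) (i : Nat) (n : Nat) (r : List (List Int)) :
    (List.range n).foldl (fun r j => r.set i ((r.getD i []).set j (f j))) r
      = r.set i ((List.range n).foldl (fun row j => row.set j (f j)) (r.getD i [])) := by
  induction n with
  | zero =>
    simp only [List.range_zero, List.foldl_nil]
    exact (set_getD_self r i).symm
  | succ n ih =>
    rw [List.range_succ, List.foldl_append, List.foldl_append, ih]
    simp only [List.foldl_cons, List.foldl_nil]
    by_cases h : i < r.length
    · rw [getD_set]
      simp [h, List.set_set]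
    · have hid : ∀ w, r.set i w = r := fun w => List.set_eq_of_length_le (by omega)
      simp only [hid]

theorem rowfold_length (f : Nat → Int) (n : Nat) (row : List Int) :
    ((List.range n).foldl (fun row j => row.set j (f j)) row).length = row.length := by
  induction n with
  | zero => rfl
  | succ n ih => rw [List.range_succ, List.foldl_append]; simp [ih]

theorem rowfold_getD (f : Nat → Int) (n : Nat) (row : List Int) (i : Nat) :
    ((List.range n).foldl (fun row j => row.set j (f j)) row).getD i 0
      = if i < n ∧ i < row.length then f i else row.getD i 0 := by
  induction n with
  | zero => simp
  | succ n ih =>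
    rw [List.range_succ, List.foldl_append]
    simp only [List.foldl_cons, List.foldl_nil]
    rw [getD_set, rowfold_length, ih]
    split_ifs <;> simp_all <;> omega

theorem rowfold_map (f : Nat → Int) (n : Nat) (row : List Int) (h : row.length = n) :
    (List.range n).foldl (fun row j => row.set j (f j)) row = (List.range n).map f := by
  apply List.ext_getElem
  · rw [rowfold_length]; simp [h]
  · intro i h1 h2
    have hi : i < n := by simpa using h2
    have hlen : i < ((List.range n).foldl (fun row j => row.set j (f j)) row).length := h1
    rw [← List.getD_eq_getElem _ 0 h1, rowfold_getD]
    simp [hi, h]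

-- generic fold over rows: r.set i (G i r[i])
theorem matfold_length (G : Nat → List Int → List Int) (n : Nat) (M : List (List Int)) :
    ((List.range n).foldl (fun r i => r.set i (G i (r.getD i []))) M).length = M.length := by
  induction n with
  | zero => rfl
  | succ n ih =>
    rw [List.range_succ, List.foldl_append]
    simp only [List.foldl_cons, List.foldl_nil, List.length_set]
    exact ih

theorem matfold_getD (G : Nat → List Int → List Int) (n : Nat) (M : List (List Int)) (i : Nat) :
    ((List.range n).foldl (fun r i => r.set i (G i (r.getD i []))) M).getD i []
      = if i < n ∧ i < M.length then G i (M.getD i []) else M.getD i [] := by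
  induction n generalizing i with
  | zero => simp
  | succ n ih =>
    rw [List.range_succ, List.foldl_append]
    simp only [List.foldl_cons, List.foldl_nil]
    rw [getD_set, matfold_length]
    simp only [ih]
    split_ifs <;> simp_all <;> omega

theorem get2_set2 (r : List (List Int)) (k j' i j : Nat) (x : Int) :
    get2 (set2 r k j' x) i j
      = if i = k ∧ k < r.length ∧ j = j' ∧ j' < (r.getD k []).length then x
        else get2 r i j := by
  simp only [get2, set2]
  rw [getD_set]
  by_cases h : k = i ∧ k < r.length
  · rw [if_pos h, getD_set]
    obtain ⟨h1, h2⟩ := h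
    subst h1
    split_ifs <;> first | rfl | omega
  · rw [if_neg h, if_neg (fun ⟨a, b, _, _⟩ => h ⟨a.symm, b⟩)]

-- second loop of A: column-0 update, characterised entrywise
theorem loop2_char (n : Nat) (M : List (List Int)) (hn : n < M.length)
    (hrow : ∀ i, i < M.length → 1 < (M.getD i []).length) :
    (∀ i j, get2 ((List.range' 1 n).foldl
        (fun r i => set2 r i 0 (get2 r i 0 + get2 r (i-1) 1)) M) i j
      = if j = 0 ∧ 1 ≤ i ∧ i ≤ n then get2 M i 0 + get2 M (i-1) 1 else get2 M i j) ∧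
    ((List.range' 1 n).foldl
        (fun r i => set2 r i 0 (get2 r i 0 + get2 r (i-1) 1)) M).length = M.length ∧
    (∀ i, (((List.range' 1 n).foldl
        (fun r i => set2 r i 0 (get2 r i 0 + get2 r (i-1) 1)) M).getD i []).length
      = (M.getD i []).length) := by
  induction n with
  | zero =>
    simp only [List.range'_zero, List.foldl_nil]
    refine ⟨fun i j => ?_, trivial, fun _ => trivial⟩
    rw [if_neg (by omega)]
  | succ n ih =>
    have hn' : n < M.length := by omega
    obtain ⟨ihg, ihl, ihr⟩ := ih hn'
    rw [List.range'_concat, List.foldl_append]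
    simp only [List.foldl_cons, List.foldl_nil, one_mul]
    set N := (List.range' 1 n).foldl (fun r i => set2 r i 0 (get2 r i 0 + get2 r (i-1) 1)) M with hN
    have hlen1 : (1+n) < N.length := by rw [ihl]; omega
    have hrow1 : 0 < (N.getD (1+n) []).length := by
      rw [ihr]; have := hrow (1+n) (by omega); omega
    refine ⟨?_, ?_, ?_⟩
    · intro i j
      rw [get2_set2]
      by_cases hC : i = 1+n ∧ j = 0
      · obtain ⟨hi, hj⟩ := hC
        subst hi; subst hj
        rw [if_pos ⟨rfl, hlen1, rfl, hrow1⟩, ihg, ihg,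
          if_neg (by omega), if_neg (by omega), if_pos (by omega)]
      · rw [if_neg (by tauto), ihg]
        split_ifs <;> first | rfl | omega
    · simp [set2, ihl]
    · intro i
      simp only [set2]
      rw [getD_set]
      split_ifs with h
      · rw [List.length_set, ihr, h.1]
      · exact ihr i

-- B-side: the accumulator fold, as a structural recursion
def bconv (p0 p1 : Int) : List Int → Int → List Int
  | [], prev => [prev]
  | v :: t, prev => (v * p0 + prev) :: bconv p0 p1 t (v * p1)

theorem alt_fold (p0 p1 : Int) (V : List Int) : ∀ (acc : List Int) (prev : Int),
    (V.foldl (fun (st : List Int × Int) v => (st.1 ++ [v * p0 + st.2], v * p1)) (acc, prev)).1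
      ++ [(V.foldl (fun (st : List Int × Int) v => (st.1 ++ [v * p0 + st.2], v * p1)) (acc, prev)).2]
    = acc ++ bconv p0 p1 V prev := by
  induction V with
  | nil => intro acc prev; simp [bconv]
  | cons v t ih =>
    intro acc prev
    simp only [List.foldl_cons, bconv]
    rw [ih]
    simp

theorem bconv_map (p0 p1 : Int) (V : List Int) : ∀ (prev : Int),
    bconv p0 p1 V prev = (List.range (V.length + 1)).map
      (fun i => (if i < V.length then V.getD i 0 * p0 else 0)
        + (if i = 0 then prev else V.getD (i-1) 0 * p1)) := by
  induction V with
  | nil => intro prev; simp [bconv, List.range_succ]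
  | cons v t ih =>
    intro prev
    simp only [bconv, ih (v * p1), List.length_cons]
    conv_rhs => rw [List.range_succ_eq_map, List.map_cons, List.map_map]
    congr 1
    apply List.map_congr_left
    intro a ha
    simp only [Function.comp]
    rcases Nat.eq_zero_or_pos a with h0 | h0
    · subst h0; simp
    · obtain ⟨k, rfl⟩ : ∃ k, a = k + 1 := ⟨a - 1, by omega⟩
      simp

-- ===== VERDICT (by name: the statement is the Claim_ definition above) =====
-- getD on replicated zero rows
theorem getD_replicate_int (n i : Nat) : (List.replicate n (0:Int)).getD i 0 = 0 := by
  simp only [List.getD, List.getElem?_replicate]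
  split_ifs <;> rfl

theorem getD_replicate_row (n : Nat) (row : List Int) (i : Nat) (h : i < n) :
    (List.replicate n row).getD i [] = row := by
  rw [List.getD_eq_getElem _ _ (by simpa using h)]
  simp

theorem convmy_spec : Claim_equal_convmy := by
  intro V polyva1 _hdom hpre
  unfold Spec_convmy
  have hB : convmy_alt V polyva1
      = [bconv (polyva1.getD 0 0) (polyva1.getD 1 0) V 0] := by
    have h := alt_fold (polyva1.getD 0 0) (polyva1.getD 1 0) V [] 0
    rw [List.nil_append] at h
    unfold convmy_alt
    exact congrArg (fun l => [l]) h
  rw [hB]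
  rcases hpre with ⟨hV, _hp⟩ | hlen2
  · -- V = []: both sides are [[0]]
    subst hV
    rw [show bconv (polyva1.getD 0 0) (polyva1.getD 1 0) [] 0 = [0] from rfl]
    simp only [convmy]
    simp only [List.length_nil, List.range_zero, List.foldl_nil, List.range'_zero,
      Nat.zero_add, List.range_one, List.foldl_cons, zerosZ_eq]
    simp [set2, get2]
  · -- general case, 2 ≤ len(polyva1)
    set n := V.length with hn
    set L := polyva1.length with hL
    set p0 := polyva1.getD 0 0 with hp0
    set p1 := polyva1.getD 1 0 with hp1
    set G : Nat → List Int → List Int := fun i row =>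
      (List.range L).foldl (fun row j => row.set j (V.getD i 0 * polyva1.getD j 0)) row with hG
    have hstep : (fun (r : List (List Int)) (i : Nat) =>
        (List.range L).foldl (fun r j => set2 r i j (V.getD i 0 * polyva1.getD j 0)) r)
      = fun r i => r.set i (G i (r.getD i [])) :=
      funext fun r => funext fun i => setfold_row _ i L r
    simp only [convmy]
    rw [zerosZ_eq, zerosZ_eq, hstep]
    set M1 := (List.range n).foldl (fun r i => r.set i (G i (r.getD i [])))
      (List.replicate (n+1) (List.replicate L 0)) with hM1
    set M2 := (List.range' 1 n).foldl
      (fun r i => set2 r i 0 (get2 r i 0 + get2 r (i-1) 1)) M1 with hM2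
    have hM1len : M1.length = n + 1 := by
      rw [hM1, matfold_length]; simp
    have hM1row : ∀ i, i < n + 1 →
        M1.getD i [] = if i < n then G i (List.replicate L 0) else List.replicate L 0 := by
      intro i hi
      rw [hM1, matfold_getD, getD_replicate_row _ _ _ (by simpa using hi)]
      simp only [List.length_replicate]
      split_ifs <;> first | rfl | omega
    have hrowlen : ∀ i, i < M1.length → (M1.getD i []).length = L := by
      intro i hi
      rw [hM1row i (by omega)]
      split_ifs
      · rw [hG, rowfold_length, List.length_replicate]
      · rw [List.length_replicate]
    have hget : ∀ i j, i < n + 1 →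
        get2 M1 i j = if i < n ∧ j < L then V.getD i 0 * polyva1.getD j 0 else 0 := by
      intro i j hi
      show (M1.getD i []).getD j 0 = _
      rw [hM1row i hi]
      by_cases hi2 : i < n
      · rw [if_pos hi2, hG]
        rw [rowfold_getD]
        simp only [List.length_replicate]
        split_ifs <;> first | rfl | omega | exact getD_replicate_int _ _
      · rw [if_neg hi2, if_neg (by omega), getD_replicate_int]
    obtain ⟨h2g, _h2l, _h2r⟩ := loop2_char n M1 (by omega)
      (fun i hi => by rw [hrowlen i hi]; omega)
    rw [← hM2] at h2g
    simp only [set2]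
    rw [setfold_row (fun i => get2 M2 i 0) 0 (n+1)]
    have hrm := rowfold_map (fun i => get2 M2 i 0) (n+1) (List.replicate (n+1) (0:Int)) (by simp)
    simp only [List.replicate_one, List.getD_cons_zero, List.set_cons_zero]
    rw [hrm, bconv_map]
    congr 1
    apply List.map_congr_left
    intro i hi
    have hi' : i < n + 1 := List.mem_range.mp hi
    rw [h2g i 0, hget i 0 hi']
    by_cases h1 : 1 ≤ i ∧ i ≤ n
    · rw [if_pos ⟨rfl, h1.1, h1.2⟩, hget (i-1) 1 (by omega),
        if_pos (show i - 1 < n ∧ 1 < L by omega),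
        if_neg (show ¬ i = 0 by omega)]
      by_cases h3 : i < n
      · rw [if_pos (show i < n ∧ 0 < L by omega), if_pos h3]
      · rw [if_neg (show ¬ (i < n ∧ 0 < L) by omega), if_neg h3]
    · have hi0 : i = 0 := by omega
      subst hi0
      rw [if_neg (by omega), if_pos rfl, add_zero]
      by_cases h3 : 0 < n
      · rw [if_pos (show 0 < n ∧ 0 < L by omega), if_pos h3]
      · rw [if_neg (show ¬ (0 < n ∧ 0 < L) by omega), if_neg h3]
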